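-- pv_equiv track=rewrite | github.com/Elinv/Nodes-Elinv-para-Blender | OdUSO/YsWDOZZWR.py | dev
-- ===== SOURCE A (Python) =====
-- def dev(clave):
--     totKey = len(clave)
--     dig,alfa,sum = 0,0,totKey
--     for x in clave:
--         if x.isdigit()==True:
--             dig += 1
--             if int(x) != 0:
--                 sum *= int(x)
--         else:
--             alfa += 1
--     return clave,dig,alfa,sum
-- ===== SOURCE B (Python) =====
-- def dev(clave):
--     # Build a character-frequency table once; then everything is read off the
--     # ten digit keys: dig is the sum of their counts, alfa its complement,
--     # and the product is len(clave) times each nonzero digit value raised to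
--     # its multiplicity (exponentiation instead of repeated multiplication).
--     cnt = {}
--     for x in clave:
--         cnt[x] = cnt.get(x, 0) + 1
--     dig = 0
--     for d in "0123456789":
--         dig += cnt.get(d, 0)
--     alfa = len(clave) - dig
--     prod = len(clave)
--     for d in "123456789":
--         prod *= int(d) ** cnt.get(d, 0)
--     return clave, dig, alfa, prod
-- ===== Notes on version B (the rewrite author's own statement) =====
-- stated objective: alternative
-- what changed: B replaces A's fused per-character accumulator loop with a character-frequency dictionary built once, from which dig is the sum of the ten digit-key counts, alfa is the complement len(clave)-dig, and the product is len(clave) times each nonzero digit value raised to its multiplicity.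
import Mathlib
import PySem

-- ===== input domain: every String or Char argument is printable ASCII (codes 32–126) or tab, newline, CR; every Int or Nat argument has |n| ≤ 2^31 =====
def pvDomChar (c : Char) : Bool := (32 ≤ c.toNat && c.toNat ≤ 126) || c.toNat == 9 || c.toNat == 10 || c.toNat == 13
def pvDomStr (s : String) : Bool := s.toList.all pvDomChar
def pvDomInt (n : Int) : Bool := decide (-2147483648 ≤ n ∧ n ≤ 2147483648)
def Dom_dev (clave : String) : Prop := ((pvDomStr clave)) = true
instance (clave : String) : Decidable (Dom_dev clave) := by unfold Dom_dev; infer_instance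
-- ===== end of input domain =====

set_option maxHeartbeats 1000000

-- B replaces A's fused per-character accumulator loop by a character-frequency
-- dictionary built once, from which dig, alfa and the product are read off the
-- ten digit keys (objective: alternative).

-- ===== PORT A =====
-- int(x) is taken exactly only where the branch guard x.isdigit() holds and x is
-- ASCII (the whole Dom); the .getD 0 default is never reached on Dom.
def devStep (st : Int × Int × Int) (x : Char) : Int × Int × Int :=
  if PySem.Chars.isdigit x = true then
    let v := (PySem.Int.ofChars? [x]).getD 0
    if v ≠ 0 then (st.1 + 1, st.2.1, st.2.2 * v) else (st.1 + 1, st.2.1, st.2.2)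
  else (st.1, st.2.1 + 1, st.2.2)

def dev (clave : String) : String × Int × Int × Int :=
  let totKey : Int := PySem.Str.len clave
  let s := clave.toList.foldl devStep (0, 0, totKey)
  (clave, s.1, s.2.1, s.2.2)

-- ===== PORT B =====
-- cnt[x] = cnt.get(x, 0) + 1  →  insert x (getD x 0 + 1); the counts are
-- nonnegative, so the .toNat on the exponent (Python's ** with a nonnegative
-- int exponent) is exact.
def dev_alt (clave : String) : String × Int × Int × Int :=
  let cnt : PySem.Dict Char Int :=
    clave.toList.foldl (fun d x => d.insert x (d.getD x 0 + 1)) PySem.Dict.empty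
  let dig : Int := ("0123456789".toList).foldl (fun acc d => acc + cnt.getD d 0) 0
  let alfa : Int := PySem.Str.len clave - dig
  let prod : Int := ("123456789".toList).foldl
    (fun acc d => acc * ((PySem.Int.ofChars? [d]).getD 0) ^ (cnt.getD d 0).toNat)
    (PySem.Str.len clave)
  (clave, dig, alfa, prod)

-- ===== PRECONDITION & SPEC =====
def Spec_dev (clave : String) (out : String × Int × Int × Int) : Prop := out = dev_alt clave
instance (clave : String) (out : String × Int × Int × Int) : Decidable (Spec_dev clave out) := by unfold Spec_dev; infer_instance

-- ===== CLAIM (what is proved, stated in full; the proofs are below) =====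
def Claim_equal_dev : Prop := ∀ (clave : String), Dom_dev clave → Spec_dev clave (dev clave)

-- ===== LEMMAS AND PROOFS =====

lemma char_eq_of_toNat (c : Char) (n : Nat) (d : Char) (h : c.toNat = n) (hd : d.toNat = n) : c = d :=
  Char.ext (UInt32.toNat_inj.mp (h.trans hd.symm))

-- a char is a Python (ASCII-range) digit iff it is one of the ten digit chars
lemma isdigit_iff_mem (c : Char) :
    PySem.Chars.isdigit c = true ↔ c ∈ ['0','1','2','3','4','5','6','7','8','9'] := by
  constructor
  · intro h
    simp only [PySem.Chars.isdigit, Bool.and_eq_true, decide_eq_true_eq, Char.le_def] at h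
    have h1 : 48 ≤ c.toNat := h.1
    have h2 : c.toNat ≤ 57 := h.2
    have hc : c.toNat = 48 ∨ c.toNat = 49 ∨ c.toNat = 50 ∨ c.toNat = 51 ∨ c.toNat = 52 ∨
        c.toNat = 53 ∨ c.toNat = 54 ∨ c.toNat = 55 ∨ c.toNat = 56 ∨ c.toNat = 57 := by omega
    rcases hc with h|h|h|h|h|h|h|h|h|h
    · rw [char_eq_of_toNat c 48 '0' h (by decide)]; decide
    · rw [char_eq_of_toNat c 49 '1' h (by decide)]; decide
    · rw [char_eq_of_toNat c 50 '2' h (by decide)]; decide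
    · rw [char_eq_of_toNat c 51 '3' h (by decide)]; decide
    · rw [char_eq_of_toNat c 52 '4' h (by decide)]; decide
    · rw [char_eq_of_toNat c 53 '5' h (by decide)]; decide
    · rw [char_eq_of_toNat c 54 '6' h (by decide)]; decide
    · rw [char_eq_of_toNat c 55 '7' h (by decide)]; decide
    · rw [char_eq_of_toNat c 56 '8' h (by decide)]; decide
    · rw [char_eq_of_toNat c 57 '9' h (by decide)]; decide
  · intro h
    fin_cases h <;> decide

-- the digit count of A's loop is the sum of the ten per-character counts B reads
lemma countP_digit_eq_sum (l : List Char) :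
    l.countP (fun x => PySem.Chars.isdigit x) =
      l.count '0' + l.count '1' + l.count '2' + l.count '3' + l.count '4' +
      l.count '5' + l.count '6' + l.count '7' + l.count '8' + l.count '9' := by
  induction l with
  | nil => simp
  | cons x xs ih =>
    by_cases h : PySem.Chars.isdigit x = true
    · have hm := (isdigit_iff_mem x).mp h
      fin_cases hm <;> simp [List.countP_cons, List.count_cons, h, ih] <;> omega
    · have hm : x ∉ ['0','1','2','3','4','5','6','7','8','9'] :=
        fun hmem => h ((isdigit_iff_mem x).mpr hmem)
      simp only [List.mem_cons, not_or] at hm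
      obtain ⟨h0, h1', h2', h3', h4', h5', h6', h7', h8', h9', -⟩ := hm
      simp [List.countP_cons, List.count_cons, h, ih, h0, h1', h2', h3', h4', h5', h6', h7', h8', h9']

lemma id0 : PySem.Chars.isdigit '0' = true := by decide
lemma id1 : PySem.Chars.isdigit '1' = true := by decide
lemma id2 : PySem.Chars.isdigit '2' = true := by decide
lemma id3 : PySem.Chars.isdigit '3' = true := by decide
lemma id4 : PySem.Chars.isdigit '4' = true := by decide
lemma id5 : PySem.Chars.isdigit '5' = true := by decide
lemma id6 : PySem.Chars.isdigit '6' = true := by decide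
lemma id7 : PySem.Chars.isdigit '7' = true := by decide
lemma id8 : PySem.Chars.isdigit '8' = true := by decide
lemma id9 : PySem.Chars.isdigit '9' = true := by decide
lemma dv0 : (PySem.Int.ofChars? ['0']).getD 0 = 0 := by decide
lemma dv1 : (PySem.Int.ofChars? ['1']).getD 0 = 1 := by decide
lemma dv2 : (PySem.Int.ofChars? ['2']).getD 0 = 2 := by decide
lemma dv3 : (PySem.Int.ofChars? ['3']).getD 0 = 3 := by decide
lemma dv4 : (PySem.Int.ofChars? ['4']).getD 0 = 4 := by decide
lemma dv5 : (PySem.Int.ofChars? ['5']).getD 0 = 5 := by decide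
lemma dv6 : (PySem.Int.ofChars? ['6']).getD 0 = 6 := by decide
lemma dv7 : (PySem.Int.ofChars? ['7']).getD 0 = 7 := by decide
lemma dv8 : (PySem.Int.ofChars? ['8']).getD 0 = 8 := by decide
lemma dv9 : (PySem.Int.ofChars? ['9']).getD 0 = 9 := by decide

-- A's fused loop in closed form: digit count, non-digit count, and the product
-- of each digit value raised to its multiplicity
lemma dev_loop (l : List Char) (dig alfa s : Int) :
    l.foldl devStep (dig, alfa, s) =
      (dig + (l.countP (fun x => PySem.Chars.isdigit x) : Int),
       alfa + (l.countP (fun x => !PySem.Chars.isdigit x) : Int),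
       s * 1 ^ l.count '1' * 2 ^ l.count '2' * 3 ^ l.count '3' * 4 ^ l.count '4' *
         5 ^ l.count '5' * 6 ^ l.count '6' * 7 ^ l.count '7' * 8 ^ l.count '8' *
         9 ^ l.count '9') := by
  induction l generalizing dig alfa s with
  | nil => simp
  | cons x xs ih =>
    by_cases h : PySem.Chars.isdigit x = true
    · have hm := (isdigit_iff_mem x).mp h
      fin_cases hm <;>
        simp [List.foldl_cons, devStep, List.countP_cons, List.count_cons, ih, h,
          id0, id1, id2, id3, id4, id5, id6, id7, id8, id9,
          dv0, dv1, dv2, dv3, dv4, dv5, dv6, dv7, dv8, dv9] <;>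
        first
          | rfl
          | (exact ⟨by push_cast; ring, by push_cast; ring⟩)
          | (push_cast; ring)
    · have hm : x ∉ ['0','1','2','3','4','5','6','7','8','9'] :=
        fun hmem => h ((isdigit_iff_mem x).mpr hmem)
      simp only [List.mem_cons, not_or] at hm
      obtain ⟨h0, h1', h2', h3', h4', h5', h6', h7', h8', h9', -⟩ := hm
      simp [List.foldl_cons, devStep, List.countP_cons, List.count_cons, h, ih,
        h0, h1', h2', h3', h4', h5', h6', h7', h8', h9']
      first
        | rfl
        | (exact ⟨by push_cast; ring, by push_cast; ring⟩)
        | (push_cast; ring)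

lemma countP_not_add (l : List Char) (p : Char → Bool) :
    l.countP p + l.countP (fun x => !p x) = l.length := by
  induction l with
  | nil => simp
  | cons x xs ih => by_cases h : p x = true <;> simp [List.countP_cons, h] <;> omega

lemma s10lit : "0123456789".toList = ['0','1','2','3','4','5','6','7','8','9'] := rfl
lemma s9lit : "123456789".toList = ['1','2','3','4','5','6','7','8','9'] := rfl

-- ===== VERDICT (by name: the statement is the Claim_ definition above) =====
theorem dev_spec : Claim_equal_dev := by
  intro clave _
  unfold Spec_dev dev dev_alt
  simp only [s10lit, s9lit, List.foldl_cons, List.foldl_nil,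
    PySem.Dict.getD_foldl_insert_add_one, PySem.Dict.getD_empty, zero_add,
    Int.toNat_natCast, dev_loop, dv1, dv2, dv3, dv4, dv5, dv6, dv7, dv8, dv9]
  rw [Prod.mk.injEq, Prod.mk.injEq, Prod.mk.injEq]
  refine ⟨rfl, ?_, ?_, ?_⟩
  · have := countP_digit_eq_sum clave.toList
    push_cast [this]; ring
  · have h1 := countP_not_add clave.toList (fun x => PySem.Chars.isdigit x)
    have h2 := countP_digit_eq_sum clave.toList
    have h3 : clave.length = clave.toList.length := by
      rw [String.length_toList]
    simp [PySem.Str.len]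
    push_cast
    omega
  · push_cast; ring
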